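-- pv_equiv track=rewrite | github.com/OpsPAI/TraceMesh | src/path_vector.py | convert_duration_to_id
-- ===== SOURCE A (Python) =====
-- def convert_duration_to_id(duration: int):
--     """
--     Convert duration to id
--     """
--     if duration < 0:
--         raise ValueError("Duration cannot be negative")
--     cnt = 0
--     while duration > 0:
--         duration = duration // 100
--         cnt += 1
--     return cnt
-- ===== SOURCE B (Python) =====
-- def convert_duration_to_id(duration: int):
--     """
--     Convert duration to id
--     """
--     if duration < 0:
--         raise ValueError("Duration cannot be negative")
--     if duration == 0:
--         return 0
--     return (len(str(duration)) + 1) // 2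
-- ===== Notes on version B (the rewrite author's own statement) =====
-- stated objective: simpler
-- what changed: Replaces the repeated //100 loop with a closed-form expression: the number of base-100 digits of a positive n equals ceil(len(str(n))/2), so B returns (len(str(n))+1)//2 (0 for n == 0).
import Mathlib
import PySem

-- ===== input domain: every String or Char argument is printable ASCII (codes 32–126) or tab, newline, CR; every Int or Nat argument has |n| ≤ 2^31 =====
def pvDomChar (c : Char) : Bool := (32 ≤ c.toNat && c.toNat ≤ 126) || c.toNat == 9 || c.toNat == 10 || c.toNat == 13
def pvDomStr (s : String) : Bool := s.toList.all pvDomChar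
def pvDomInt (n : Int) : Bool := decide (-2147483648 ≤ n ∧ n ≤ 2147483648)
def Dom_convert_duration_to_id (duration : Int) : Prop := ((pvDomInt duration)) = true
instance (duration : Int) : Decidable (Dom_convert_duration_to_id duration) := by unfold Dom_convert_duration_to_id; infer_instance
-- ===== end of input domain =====

-- B replaces A's repeated //100 loop with the closed form ceil(len(str(n))/2) (simpler, no loop).


-- ===== PORT A =====
-- the 'while duration > 0' loop of A, carrying its two variables (duration, cnt)
def pvCntLoop (duration : Int) (cnt : Int) : Int :=
  if duration > 0 then pvCntLoop (PySem.Int.floordiv duration 100) (cnt + 1) else cnt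
termination_by duration.toNat
decreasing_by
  rw [PySem.Int.floordiv_eq_ediv_of_pos (by norm_num : (0:Int) < 100)]
  omega

-- negative duration raises ValueError (excluded by Pre_); the value 0 there is arbitrary
def convert_duration_to_id (duration : Int) : Int :=
  if duration < 0 then 0 else pvCntLoop duration 0

-- ===== PORT B =====
def convert_duration_to_id_alt (duration : Int) : Int :=
  if duration < 0 then 0  -- raises ValueError in Python; excluded by Pre_
  else if duration = 0 then 0
  else PySem.Int.floordiv (PySem.Str.len (PySem.Int.toStr duration) + 1) 2

-- ===== PRECONDITION & SPEC =====
-- A raises ValueError on negative duration; Pre_ excludes exactly those inputs.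
def Pre_convert_duration_to_id (duration : Int) : Prop := 0 ≤ duration
instance (duration : Int) : Decidable (Pre_convert_duration_to_id duration) := by unfold Pre_convert_duration_to_id; infer_instance
def pvWitness_convert_duration_to_id : Int := 12345
def Spec_convert_duration_to_id (duration : Int) (out : Int) : Prop := out = convert_duration_to_id_alt duration
instance (duration : Int) (out : Int) : Decidable (Spec_convert_duration_to_id duration out) := by unfold Spec_convert_duration_to_id; infer_instance

-- ===== CLAIM (what is proved, stated in full; the proofs are below) =====
def Claim_equal_convert_duration_to_id : Prop := ∀ (duration : Int), Dom_convert_duration_to_id duration → Pre_convert_duration_to_id duration → Spec_convert_duration_to_id duration (convert_duration_to_id duration)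

-- ===== LEMMAS AND PROOFS =====

-- decimal length of a natural number, as computed by `Nat.toDigits 10`
def pvDecLen (m : Nat) : Nat := (Nat.toDigits 10 m).length

-- `Nat.toDigitsCore` does not depend on the fuel once it is > m
lemma pvCore_fuel : ∀ (f f' m : Nat) (l : List Char), m < f → m < f' →
    Nat.toDigitsCore 10 f m l = Nat.toDigitsCore 10 f' m l := by
  intro f
  induction f with
  | zero => intro f' m l h; omega
  | succ f ih =>
    intro f' m l h h'
    cases f' with
    | zero => omega
    | succ f' =>
      simp only [Nat.toDigitsCore]
      by_cases hx : m / 10 = 0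
      · simp [hx]
      · simp only [hx, if_false]
        exact ih f' (m / 10) _ (by omega) (by omega)

lemma pvDecLen_small (m : Nat) (h : m < 10) : pvDecLen m = 1 := by
  have hx : m / 10 = 0 := Nat.div_eq_of_lt h
  simp [pvDecLen, Nat.toDigits, Nat.toDigitsCore, hx]

lemma pvDecLen_step (m : Nat) (h : 10 ≤ m) : pvDecLen m = pvDecLen (m / 10) + 1 := by
  have hx : m / 10 ≠ 0 := by omega
  have h1 : Nat.toDigits 10 m =
      Nat.toDigitsCore 10 m (m / 10) [Nat.digitChar (m % 10)] := by
    simp only [Nat.toDigits, Nat.toDigitsCore, hx, if_false]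
  have h2 : Nat.toDigitsCore 10 m (m / 10) [Nat.digitChar (m % 10)] =
      Nat.toDigitsCore 10 (m / 10 + 1) (m / 10) [Nat.digitChar (m % 10)] :=
    pvCore_fuel m (m / 10 + 1) (m / 10) _ (by omega) (by omega)
  have h3 := Nat.toDigitsCore_lens_eq 10 (m / 10 + 1) (m / 10) (Nat.digitChar (m % 10)) []
  simp only [pvDecLen, h1, h2, h3]
  rfl

lemma pvDecLen_step100 (m : Nat) (h : 100 ≤ m) : pvDecLen m = pvDecLen (m / 100) + 2 := by
  rw [pvDecLen_step m (by omega), pvDecLen_step (m / 10) (by omega),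
    Nat.div_div_eq_div_mul]

lemma pvDecLen_lt100 (m : Nat) (h0 : 0 < m) (h : m < 100) : pvDecLen m = 1 ∨ pvDecLen m = 2 := by
  by_cases h10 : m < 10
  · exact Or.inl (pvDecLen_small m h10)
  · exact Or.inr (by rw [pvDecLen_step m (by omega), pvDecLen_small (m / 10) (by omega)])

-- the loop computes cnt + ceil(pvDecLen m / 2) on any positive natural input
lemma pvCntLoop_eq (m : Nat) (hm : 0 < m) (c : Int) :
    pvCntLoop (m : Int) c = c + ((pvDecLen m + 1) / 2 : Nat) := by
  induction m using Nat.strong_induction_on generalizing c with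
  | _ m ih =>
    rw [pvCntLoop]
    have hpos : ((m : Int) > 0) := by exact_mod_cast hm
    rw [if_pos hpos]
    have hfd : PySem.Int.floordiv (m : Int) (100 : Int) = ((m / 100 : Nat) : Int) := by
      exact_mod_cast PySem.Int.floordiv_natCast m 100
    rw [hfd]
    by_cases h100 : m < 100
    · have hz : m / 100 = 0 := Nat.div_eq_of_lt h100
      rw [hz]
      rw [pvCntLoop, if_neg (by norm_num)]
      rcases pvDecLen_lt100 m hm h100 with h | h <;> rw [h] <;> norm_num
    · have hq : 0 < m / 100 := Nat.div_pos (by omega) (by omega)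
      rw [ih (m / 100) (by omega) hq (c + 1)]
      rw [pvDecLen_step100 m (by omega)]
      have : (pvDecLen (m / 100) + 2 + 1) / 2 = (pvDecLen (m / 100) + 1) / 2 + 1 := by omega
      rw [this]
      push_cast
      ring

lemma pvStrLen_toStr (m : Nat) : PySem.Str.len (PySem.Int.toStr (m : Int)) = (pvDecLen m : Int) := by
  rw [PySem.Str.len_eq, PySem.Int.toList_toStr]
  have hneg : ¬ ((m : Int) < 0) := by omega
  simp [PySem.Int.toChars, pvDecLen, hneg]

-- ===== VERDICT (by name: the statement is the Claim_ definition above) =====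
theorem convert_duration_to_id_spec : Claim_equal_convert_duration_to_id := by
  intro duration _ hpre
  have hpre' : 0 ≤ duration := hpre
  unfold Spec_convert_duration_to_id convert_duration_to_id convert_duration_to_id_alt
  rw [if_neg (by omega), if_neg (by omega)]
  by_cases h0 : duration = 0
  · subst h0
    rw [if_pos rfl, pvCntLoop, if_neg (by norm_num)]
  · rw [if_neg h0]
    obtain ⟨m, rfl⟩ : ∃ m : Nat, duration = (m : Int) :=
      ⟨duration.toNat, (Int.toNat_of_nonneg hpre).symm⟩
    have hm : 0 < m := by omega
    rw [pvCntLoop_eq m hm 0, pvStrLen_toStr m]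
    have : (pvDecLen m : Int) + 1 = ((pvDecLen m + 1 : Nat) : Int) := by push_cast; ring
    rw [this]
    have hfd : PySem.Int.floordiv ((pvDecLen m + 1 : Nat) : Int) (2 : Int) =
        (((pvDecLen m + 1) / 2 : Nat) : Int) := by
      exact_mod_cast PySem.Int.floordiv_natCast (pvDecLen m + 1) 2
    rw [hfd]
    ring
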